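-- pv_equiv track=rewrite | github.com/daniel-reich/ubiquitous-fiesta | gLjL4aLT2ZwbMXafq_0.py | fair_swap
-- ===== SOURCE A (Python) =====
-- def fair_swap(l1, l2):
--   swaps = set()
--   l1_sum = sum(l1)
--   l2_sum = sum(l2)
--   for num1 in set(l1):
--     for num2 in set(l2):
--       if l1_sum - num1 + num2 == l2_sum - num2 + num1:
--         swaps.add((num1, num2))
--   return swaps
-- ===== SOURCE B (Python) =====
-- def fair_swap(l1, l2):
--   d = sum(l2) - sum(l1)
--   if d % 2 != 0:
--     return set()
--   h = d // 2
--   s2 = set(l2)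
--   return {(x, x + h) for x in set(l1) if x + h in s2}
-- ===== Notes on version B (the rewrite author's own statement) =====
-- stated objective: faster
-- what changed: Replaces the nested scan over set(l1) x set(l2) by computing the required fixed difference h = (sum(l2)-sum(l1))/2 once (empty result if the difference is odd) and doing one hash-set membership test x+h in set(l2) per distinct element of l1.
import Mathlib
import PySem

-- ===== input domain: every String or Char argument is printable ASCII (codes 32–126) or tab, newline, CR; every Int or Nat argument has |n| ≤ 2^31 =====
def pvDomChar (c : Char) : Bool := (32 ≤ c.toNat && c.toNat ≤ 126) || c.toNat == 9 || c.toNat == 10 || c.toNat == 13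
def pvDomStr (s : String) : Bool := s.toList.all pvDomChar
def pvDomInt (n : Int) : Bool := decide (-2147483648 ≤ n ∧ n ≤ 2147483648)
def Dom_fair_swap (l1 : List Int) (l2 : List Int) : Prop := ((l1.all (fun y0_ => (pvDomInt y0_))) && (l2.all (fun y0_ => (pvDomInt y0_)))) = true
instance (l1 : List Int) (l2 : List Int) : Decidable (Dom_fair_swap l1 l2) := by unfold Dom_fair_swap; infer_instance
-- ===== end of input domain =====

-- B replaces A's nested scan over set(l1) × set(l2) by one membership test per
-- distinct element of l1 against the fixed required partner x + (sum(l2)-sum(l1))/2.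

-- ===== PORT A =====
def fair_swap (l1 : List Int) (l2 : List Int) : List (Int × Int) :=
  let l1_sum := l1.sum
  let l2_sum := l2.sum
  (PySem.Set.ofList l1).foldl (fun swaps num1 =>
    (PySem.Set.ofList l2).foldl (fun swaps num2 =>
      if l1_sum - num1 + num2 = l2_sum - num2 + num1 then
        PySem.Set.add swaps (num1, num2)
      else swaps) swaps) PySem.Set.empty

-- ===== PORT B =====
def fair_swap_alt (l1 : List Int) (l2 : List Int) : List (Int × Int) :=
  let d := l2.sum - l1.sum
  if PySem.Int.mod d 2 ≠ 0 then PySem.Set.empty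
  else
    let h := PySem.Int.floordiv d 2
    let s2 := PySem.Set.ofList l2
    PySem.Set.ofList
      (((PySem.Set.ofList l1).filter (fun x => PySem.Set.contains s2 (x + h))).map
        (fun x => (x, x + h)))

-- ===== PRECONDITION & SPEC =====
def Spec_fair_swap (l1 : List Int) (l2 : List Int) (out : List (Int × Int)) : Prop := out = fair_swap_alt l1 l2
instance (l1 : List Int) (l2 : List Int) (out : List (Int × Int)) : Decidable (Spec_fair_swap l1 l2 out) := by unfold Spec_fair_swap; infer_instance

-- ===== CLAIM (what is proved, stated in full; the proofs are below) =====
def Claim_equal_fair_swap : Prop := ∀ (l1 : List Int) (l2 : List Int), Dom_fair_swap l1 l2 → Spec_fair_swap l1 l2 (fair_swap l1 l2)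

-- ===== LEMMAS AND PROOFS =====

-- adding an element already present (after a first add) changes nothing
theorem pv_add_idem {α : Type} [BEq α] [LawfulBEq α] (s : PySem.Set α) (x : α) :
    PySem.Set.add (PySem.Set.add s x) x = PySem.Set.add s x := by
  have hx : (PySem.Set.add s x).contains x = true := by
    simp [PySem.Set.contains, PySem.Set.mem_add]
  have hdef : PySem.Set.add (PySem.Set.add s x) x
      = if (PySem.Set.add s x).contains x = true then PySem.Set.add s x
        else PySem.Set.add s x ++ [x] := rfl
  rw [hdef, if_pos hx]

-- A's inner loop: scanning L for elements equal to c and adding the pair p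
theorem pv_inner (L : List Int) (c : Int) (p : Int × Int) :
    ∀ acc : PySem.Set (Int × Int),
      L.foldl (fun sw n2 => if n2 = c then PySem.Set.add sw p else sw) acc
        = if L.contains c then PySem.Set.add acc p else acc := by
  induction L with
  | nil => intro acc; simp
  | cons a L ih =>
    intro acc
    by_cases ha : a = c
    · subst ha
      simp only [List.foldl_cons, List.contains_cons, BEq.rfl, Bool.true_or, if_pos]
      rw [ih]
      split
      · exact pv_add_idem acc p
      · rfl
    · simp only [List.foldl_cons, if_neg ha, List.contains_cons]
      rw [ih]
      have hca : ¬ c = a := fun h => ha h.symm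
      simp [hca]

-- filter-then-map folded with Set.add equals the guarded single-pass fold
theorem pv_fuse (p : Int → Bool) (f : Int → Int × Int) (L : List Int) :
    ∀ acc : PySem.Set (Int × Int),
      ((L.filter p).map f).foldl PySem.Set.add acc
        = L.foldl (fun sw x => if p x then PySem.Set.add sw (f x) else sw) acc := by
  induction L with
  | nil => intro acc; simp
  | cons a L ih =>
    intro acc
    by_cases hp : p a = true
    · simp [hp, ih]
    · simp [hp, ih]

-- ===== VERDICT (by name: the statement is the Claim_ definition above) =====
theorem fair_swap_spec : Claim_equal_fair_swap := by
  intro l1 l2 _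
  unfold Spec_fair_swap fair_swap fair_swap_alt
  set d : Int := l2.sum - l1.sum with hd
  have hdm := PySem.Int.floordiv_mul_add_mod d 2
  rcases PySem.Int.mod_two_eq d with hm | hm
  · -- d even: each num1 has the unique partner num1 + h
    set h : Int := PySem.Int.floordiv d 2 with hh
    have hd2 : d = 2 * h := by omega
    simp only [hm, ne_eq, not_true_eq_false, if_false]
    rw [PySem.Set.ofList_eq_foldl
      (((PySem.Set.ofList l1).filter (fun x => PySem.Set.contains (PySem.Set.ofList l2) (x + h))).map
        (fun x => (x, x + h)))]
    rw [pv_fuse]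
    have houter : (fun (sw : PySem.Set (Int × Int)) (num1 : Int) =>
        (PySem.Set.ofList l2).foldl (fun sw num2 =>
          if l1.sum - num1 + num2 = l2.sum - num2 + num1 then PySem.Set.add sw (num1, num2) else sw) sw)
        = (fun (sw : PySem.Set (Int × Int)) (num1 : Int) =>
            if PySem.Set.contains (PySem.Set.ofList l2) (num1 + h) then PySem.Set.add sw (num1, num1 + h) else sw) := by
      funext sw num1
      have hcond : ∀ num2 : Int,
          (l1.sum - num1 + num2 = l2.sum - num2 + num1) ↔ num2 = num1 + h := by
        intro num2; omega
      have : (fun (sw : PySem.Set (Int × Int)) (num2 : Int) =>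
          if l1.sum - num1 + num2 = l2.sum - num2 + num1 then PySem.Set.add sw (num1, num2) else sw)
          = (fun sw num2 => if num2 = num1 + h then PySem.Set.add sw (num1, num2) else sw) := by
        funext sw num2
        by_cases hc : num2 = num1 + h
        · rw [if_pos ((hcond num2).2 hc), if_pos hc]
        · rw [if_neg (fun hx => hc ((hcond num2).1 hx)), if_neg hc]
      rw [this]
      have : (fun (sw : PySem.Set (Int × Int)) (num2 : Int) =>
          if num2 = num1 + h then PySem.Set.add sw (num1, num2) else sw)
          = (fun sw num2 => if num2 = num1 + h then PySem.Set.add sw (num1, num1 + h) else sw) := by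
        funext sw num2
        by_cases hc : num2 = num1 + h
        · subst hc; rfl
        · simp [hc]
      rw [this, pv_inner]
      simp [PySem.Set.contains]
    rw [houter]
    rfl
  · -- d odd: the balance condition is unsatisfiable, both sides are empty
    have hno : ∀ num1 num2 : Int, ¬ (l1.sum - num1 + num2 = l2.sum - num2 + num1) := by
      intro num1 num2; omega
    simp only [hm, ne_eq]
    have hin : ∀ (num1 : Int) (sw : PySem.Set (Int × Int)),
        (PySem.Set.ofList l2).foldl (fun sw num2 =>
          if l1.sum - num1 + num2 = l2.sum - num2 + num1 then PySem.Set.add sw (num1, num2) else sw) sw = sw := by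
      intro num1 sw
      induction (PySem.Set.ofList l2 : List Int) generalizing sw with
      | nil => rfl
      | cons a L ih => simp [if_neg (hno num1 a), ih]
    have : ∀ (L : List Int) (sw : PySem.Set (Int × Int)),
        L.foldl (fun sw num1 =>
          (PySem.Set.ofList l2).foldl (fun sw num2 =>
            if l1.sum - num1 + num2 = l2.sum - num2 + num1 then PySem.Set.add sw (num1, num2) else sw) sw) sw = sw := by
      intro L
      induction L with
      | nil => intro sw; rfl
      | cons a L ih => intro sw; simp only [List.foldl_cons, hin a sw]; exact ih sw
    rw [this]
    norm_num
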